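-- pv_equiv track=rewrite | github.com/shaman007/home-k3s | tools/networkpolicy/render_networkpolicies_svg.py | layout_namespaces
-- ===== SOURCE A (Python) =====
-- PAGE_MARGIN = 28
--
-- GAP = 20
--
-- SECTION_WIDTH = 608
--
-- def layout_namespaces(namespace_sections, start_y):
--     column_x = [PAGE_MARGIN + i * (SECTION_WIDTH + GAP) for i in range(3)]
--     column_y = [start_y, start_y, start_y]
--     positioned = []
--
--     for section in namespace_sections:
--         index = min(range(3), key=lambda idx: column_y[idx])
--         x = column_x[index]
--         y = column_y[index]
--         section["x"] = x
--         section["y"] = y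
--         positioned.append(section)
--         column_y[index] += section["height"] + GAP
--
--     return positioned, max(column_y) + PAGE_MARGIN
-- ===== SOURCE B (Python) =====
-- PAGE_MARGIN = 28
--
-- GAP = 20
--
-- SECTION_WIDTH = 608
--
-- def layout_namespaces(namespace_sections, start_y):
--     # Priority queue of (next_free_y, column_index), kept sorted ascending;
--     # lexicographic tuple order reproduces A's lowest-index tie-break.
--     pq = [(start_y, 0), (start_y, 1), (start_y, 2)]
--     positioned = []
--     for section in namespace_sections:
--         y, idx = pq.pop(0)
--         section["x"] = PAGE_MARGIN + idx * (SECTION_WIDTH + GAP)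
--         section["y"] = y
--         positioned.append(section)
--         entry = (y + section["height"] + GAP, idx)
--         i = 0
--         while i < len(pq) and pq[i] <= entry:
--             i += 1
--         pq.insert(i, entry)
--     return positioned, max(t[0] for t in pq) + PAGE_MARGIN
-- ===== Notes on version B (the rewrite author's own statement) =====
-- stated objective: alternative
-- what changed: Replaces A's per-section min(range(3), key=...) argmin scan over a mutable column-height list with a priority queue kept as a sorted list of (next_free_y, column_index) pairs: pop the head, push the updated entry back in order; lexicographic tuple order reproduces A's lowest-index tie-break.
import Mathlib
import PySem

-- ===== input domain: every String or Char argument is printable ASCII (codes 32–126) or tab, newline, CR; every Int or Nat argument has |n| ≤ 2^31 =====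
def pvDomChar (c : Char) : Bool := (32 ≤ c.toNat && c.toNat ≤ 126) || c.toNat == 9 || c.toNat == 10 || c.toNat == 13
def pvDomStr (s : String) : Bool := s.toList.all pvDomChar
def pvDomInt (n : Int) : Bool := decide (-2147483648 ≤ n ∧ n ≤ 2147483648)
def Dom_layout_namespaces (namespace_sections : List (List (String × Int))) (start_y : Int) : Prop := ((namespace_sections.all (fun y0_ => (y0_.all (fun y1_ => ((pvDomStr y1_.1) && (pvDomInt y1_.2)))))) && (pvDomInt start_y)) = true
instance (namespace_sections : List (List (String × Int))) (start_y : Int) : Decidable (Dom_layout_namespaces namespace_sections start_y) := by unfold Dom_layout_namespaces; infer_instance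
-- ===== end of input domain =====

-- B replaces A's per-section argmin scan over the three column heights by a priority
-- queue (a sorted list of (next_free_y, column_index) pairs): pop the head, push the
-- updated entry back in order; same return value, a different data structure
-- (objective: alternative). Both Pythons mutate the section dicts in place (adding
-- "x"/"y"); the equivalence proved here is about the RETURN value (which contains
-- those updated dicts).

-- ===== PORT A =====
def layout_namespaces (namespace_sections : List (List (String × Int))) (start_y : Int) : (List (List (String × Int))) × Int :=
  let column_x : List Int := (PySem.List.pyRange 0 3 1).map (fun i => 28 + i * (608 + 20))
  let st := namespace_sections.foldl (fun (st : List Int × List (List (String × Int))) sec =>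
    let column_y := st.1
    -- min(range(3), key=lambda idx: column_y[idx])
    let index : Int := (PySem.List.min? (PySem.List.pyRange 0 3 1) (fun idx => PySem.List.pyGetD column_y idx 0)).getD 0
    let x := PySem.List.pyGetD column_x index 0
    let y := PySem.List.pyGetD column_y index 0
    let d := ((PySem.Dict.mk sec).insert "x" x).insert "y" y
    -- section["height"] raises KeyError when the key is absent; Pre_ excludes that, so the default is never used
    let h := d.getD "height" 0
    (PySem.List.pySetD column_y index (y + h + 20), st.2 ++ [d.items]))
    ([start_y, start_y, start_y], [])
  (st.2, (PySem.List.max? st.1 (fun v => v)).getD 0 + 28)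

-- ===== PORT B =====
-- Python tuple comparison (y, idx) <= (y', idx'): lexicographic on Int pairs
def pvLexLe (p q : Int × Int) : Bool := p.1 < q.1 || (p.1 == q.1 && p.2 ≤ q.2)

-- Source B's while/insert: place e after every entry <= e (keeps the queue sorted)
def pvInsSorted (e : Int × Int) : List (Int × Int) → List (Int × Int)
  | [] => [e]
  | p :: t => if pvLexLe p e then p :: pvInsSorted e t else e :: p :: t

def layout_namespaces_alt (namespace_sections : List (List (String × Int))) (start_y : Int) : (List (List (String × Int))) × Int :=
  let st := namespace_sections.foldl (fun (st : List (Int × Int) × List (List (String × Int))) sec =>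
    match st.1 with
    | [] => st  -- unreachable: the queue always holds 3 entries (pq.pop(0) would raise on [])
    | (y, idx) :: rest =>
      let d := ((PySem.Dict.mk sec).insert "x" (28 + idx * (608 + 20))).insert "y" y
      -- section["height"] raises KeyError when the key is absent; Pre_ excludes that, so the default is never used
      let h := d.getD "height" 0
      (pvInsSorted (y + h + 20, idx) rest, st.2 ++ [d.items]))
    ([(start_y, 0), (start_y, 1), (start_y, 2)], [])
  (st.2, (PySem.List.max? (st.1.map Prod.fst) (fun v => v)).getD 0 + 28)

-- ===== PRECONDITION & SPEC =====
-- Pre_ excludes exactly the sections without a "height" key, on which Python A raises KeyError.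
def Pre_layout_namespaces (namespace_sections : List (List (String × Int))) (start_y : Int) : Prop :=
  ∀ sec ∈ namespace_sections, (PySem.Dict.mk sec).contains "height" = true
instance (namespace_sections : List (List (String × Int))) (start_y : Int) : Decidable (Pre_layout_namespaces namespace_sections start_y) := by unfold Pre_layout_namespaces; infer_instance

def pvWitness_layout_namespaces : (List (List (String × Int))) × Int :=
  ([[("name", 1), ("height", 40)], [("height", 10)], [("height", 5)], [("height", 7)]], 50)

def Spec_layout_namespaces (namespace_sections : List (List (String × Int))) (start_y : Int) (out : (List (List (String × Int))) × Int) : Prop := out = layout_namespaces_alt namespace_sections start_y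
instance (namespace_sections : List (List (String × Int))) (start_y : Int) (out : (List (List (String × Int))) × Int) : Decidable (Spec_layout_namespaces namespace_sections start_y out) := by unfold Spec_layout_namespaces; infer_instance

-- ===== CLAIM (what is proved, stated in full; the proofs are below) =====
def Claim_equal_layout_namespaces : Prop := ∀ (namespace_sections : List (List (String × Int))) (start_y : Int), Dom_layout_namespaces namespace_sections start_y → Pre_layout_namespaces namespace_sections start_y → Spec_layout_namespaces namespace_sections start_y (layout_namespaces namespace_sections start_y)

-- ===== LEMMAS AND PROOFS =====

-- the loop bodies of the two ports, named (definitionally equal to the lambdas above)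
def pvBodyA (st : List Int × List (List (String × Int))) (sec : List (String × Int)) : List Int × List (List (String × Int)) :=
  let column_y := st.1
  let index : Int := (PySem.List.min? (PySem.List.pyRange 0 3 1) (fun idx => PySem.List.pyGetD column_y idx 0)).getD 0
  let x := PySem.List.pyGetD ((PySem.List.pyRange 0 3 1).map (fun i => 28 + i * (608 + 20))) index 0
  let y := PySem.List.pyGetD column_y index 0
  let d := ((PySem.Dict.mk sec).insert "x" x).insert "y" y
  let h := d.getD "height" 0
  (PySem.List.pySetD column_y index (y + h + 20), st.2 ++ [d.items])

def pvBodyB (st : List (Int × Int) × List (List (String × Int))) (sec : List (String × Int)) : List (Int × Int) × List (List (String × Int)) :=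
  match st.1 with
  | [] => st
  | (y, idx) :: rest =>
    let d := ((PySem.Dict.mk sec).insert "x" (28 + idx * (608 + 20))).insert "y" y
    let h := d.getD "height" 0
    (pvInsSorted (y + h + 20, idx) rest, st.2 ++ [d.items])

-- the sorted queue that corresponds to A's column heights [a, b, c]
def pvSort3 (a b c : Int) : List (Int × Int) := pvInsSorted (c, 2) (pvInsSorted (b, 1) [(a, 0)])

theorem pv_minIdx (a b c : Int) : (PySem.List.min? (PySem.List.pyRange 0 3 1) (fun idx => PySem.List.pyGetD ([a,b,c] : List Int) idx 0)).getD 0 = (if b < a then (if c < b then 2 else 1) else (if c < a then 2 else 0)) := by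
  have h : PySem.List.pyRange 0 3 1 = ([0,1,2] : List Int) := by decide
  rw [h]
  simp only [PySem.List.min?]
  by_cases h1 : b < a <;> by_cases h2 : c < b <;> by_cases h3 : c < a <;>
    simp [h1, h2, h3, PySem.List.pyGetD_ofNat']

theorem pv_init (s : Int) : pvSort3 s s s = [(s,0),(s,1),(s,2)] := by
  simp [pvSort3, pvInsSorted, pvLexLe]

theorem pv_head0 (a b c : Int) (h1 : ¬ b < a) (h3 : ¬ c < a) : pvSort3 a b c = (a,0) :: pvInsSorted (c,2) [(b,1)] := by
  simp only [pvSort3, pvInsSorted, pvLexLe]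
  repeat' (first | rfl | omega | (exfalso; omega) | (split_ifs <;> simp_all [pvInsSorted, pvLexLe]))

theorem pv_head1 (a b c : Int) (h1 : b < a) (h2 : ¬ c < b) : pvSort3 a b c = (b,1) :: (if c < a then [(c,2),(a,0)] else [(a,0),(c,2)]) := by
  simp only [pvSort3, pvInsSorted, pvLexLe]
  repeat' (first | rfl | omega | (exfalso; omega) | (split_ifs <;> simp_all [pvInsSorted, pvLexLe]))

theorem pv_head2 (a b c : Int) (h2 : c < b) (h3 : c < a) : pvSort3 a b c = (c,2) :: (if b < a then [(b,1),(a,0)] else [(a,0),(b,1)]) := by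
  simp only [pvSort3, pvInsSorted, pvLexLe]
  repeat' (first | rfl | omega | (exfalso; omega) | (split_ifs <;> simp_all [pvInsSorted, pvLexLe]))

theorem pv_L0 (v b c : Int) : pvInsSorted (v,0) (pvInsSorted (c,2) [(b,1)]) = pvSort3 v b c := by
  simp only [pvSort3, pvInsSorted, pvLexLe]
  repeat' (first | rfl | omega | (exfalso; omega) | (split_ifs <;> simp_all [pvInsSorted, pvLexLe]))

theorem pv_L1 (a v c : Int) : pvInsSorted (v,1) (if c < a then [(c,2),(a,0)] else [(a,0),(c,2)]) = pvSort3 a v c := by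
  simp only [pvSort3, pvInsSorted, pvLexLe]
  repeat' (first | rfl | omega | (exfalso; omega) | (split_ifs <;> simp_all [pvInsSorted, pvLexLe]))

theorem pv_L2 (a b v : Int) : pvInsSorted (v,2) (if b < a then [(b,1),(a,0)] else [(a,0),(b,1)]) = pvSort3 a b v := by
  simp only [pvSort3, pvInsSorted, pvLexLe]
  repeat' (first | rfl | omega | (exfalso; omega) | (split_ifs <;> simp_all [pvInsSorted, pvLexLe]))

theorem pv_step0 (a b c : Int) (pos : List (List (String × Int))) (sec : List (String × Int))
    (h1 : ¬ b < a) (h3 : ¬ c < a) :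
    pvBodyA ([a,b,c], pos) sec =
      ([a + (((PySem.Dict.mk sec).insert "x" 28).insert "y" a).getD "height" 0 + 20, b, c],
       pos ++ [(((PySem.Dict.mk sec).insert "x" 28).insert "y" a).items])
    ∧ pvBodyB (pvSort3 a b c, pos) sec =
      (pvSort3 (a + (((PySem.Dict.mk sec).insert "x" 28).insert "y" a).getD "height" 0 + 20) b c,
       pos ++ [(((PySem.Dict.mk sec).insert "x" 28).insert "y" a).items]) := by
  constructor
  · simp only [pvBodyA]
    rw [pv_minIdx]
    simp [h1, h3, PySem.List.pyGetD_ofNat', PySem.List.pySetD_of_nonneg]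
  · rw [pv_head0 a b c h1 h3]
    simp only [pvBodyB]
    norm_num [pv_L0]

theorem pv_step1 (a b c : Int) (pos : List (List (String × Int))) (sec : List (String × Int))
    (h1 : b < a) (h2 : ¬ c < b) :
    pvBodyA ([a,b,c], pos) sec =
      ([a, b + (((PySem.Dict.mk sec).insert "x" 656).insert "y" b).getD "height" 0 + 20, c],
       pos ++ [(((PySem.Dict.mk sec).insert "x" 656).insert "y" b).items])
    ∧ pvBodyB (pvSort3 a b c, pos) sec =
      (pvSort3 a (b + (((PySem.Dict.mk sec).insert "x" 656).insert "y" b).getD "height" 0 + 20) c,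
       pos ++ [(((PySem.Dict.mk sec).insert "x" 656).insert "y" b).items]) := by
  constructor
  · simp only [pvBodyA]
    rw [pv_minIdx]
    simp [h1, h2, PySem.List.pyGetD_ofNat', PySem.List.pySetD_of_nonneg]
  · rw [pv_head1 a b c h1 h2]
    simp only [pvBodyB]
    norm_num [pv_L1]

theorem pv_step2 (a b c : Int) (pos : List (List (String × Int))) (sec : List (String × Int))
    (h2 : c < b) (h3 : c < a) :
    pvBodyA ([a,b,c], pos) sec =
      ([a, b, c + (((PySem.Dict.mk sec).insert "x" 1284).insert "y" c).getD "height" 0 + 20],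
       pos ++ [(((PySem.Dict.mk sec).insert "x" 1284).insert "y" c).items])
    ∧ pvBodyB (pvSort3 a b c, pos) sec =
      (pvSort3 a b (c + (((PySem.Dict.mk sec).insert "x" 1284).insert "y" c).getD "height" 0 + 20),
       pos ++ [(((PySem.Dict.mk sec).insert "x" 1284).insert "y" c).items]) := by
  constructor
  · simp only [pvBodyA]
    rw [pv_minIdx]
    simp [h2, h3, PySem.List.pyGetD_ofNat', PySem.List.pySetD_of_nonneg]
  · rw [pv_head2 a b c h2 h3]
    simp only [pvBodyB]
    norm_num [pv_L2]

theorem pv_loop (l : List (List (String × Int))) : ∀ (a b c : Int) (pos : List (List (String × Int))),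
    ∃ a' b' c' : Int,
      l.foldl pvBodyA ([a,b,c], pos) = ([a',b',c'], (l.foldl pvBodyB (pvSort3 a b c, pos)).2)
      ∧ (l.foldl pvBodyB (pvSort3 a b c, pos)).1 = pvSort3 a' b' c' := by
  induction l with
  | nil => intro a b c pos; exact ⟨a, b, c, rfl, rfl⟩
  | cons sec l ih =>
    intro a b c pos
    simp only [List.foldl_cons]
    by_cases h1 : b < a <;> by_cases h2 : c < b <;> by_cases h3 : c < a
    · obtain ⟨e1, e2⟩ := pv_step2 a b c pos sec h2 h3; rw [e1, e2]; exact ih _ _ _ _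
    · exfalso; omega
    · obtain ⟨e1, e2⟩ := pv_step1 a b c pos sec h1 h2; rw [e1, e2]; exact ih _ _ _ _
    · obtain ⟨e1, e2⟩ := pv_step1 a b c pos sec h1 h2; rw [e1, e2]; exact ih _ _ _ _
    · obtain ⟨e1, e2⟩ := pv_step2 a b c pos sec h2 h3; rw [e1, e2]; exact ih _ _ _ _
    · obtain ⟨e1, e2⟩ := pv_step0 a b c pos sec h1 h3; rw [e1, e2]; exact ih _ _ _ _
    · exfalso; omega
    · obtain ⟨e1, e2⟩ := pv_step0 a b c pos sec h1 h3; rw [e1, e2]; exact ih _ _ _ _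

theorem pv_max (a b c : Int) : (PySem.List.max? ((pvSort3 a b c).map Prod.fst) (fun v => v)).getD 0 = (PySem.List.max? ([a,b,c] : List Int) (fun v => v)).getD 0 := by
  simp only [pvSort3, pvInsSorted, pvLexLe]
  repeat' (first | rfl | omega | (exfalso; omega) | (split_ifs <;> simp_all [PySem.List.max?, List.map, List.foldl_cons, List.foldl_nil, pvInsSorted, pvLexLe]))

-- ===== VERDICT (by name: the statement is the Claim_ definition above) =====
theorem layout_namespaces_spec : Claim_equal_layout_namespaces := by
  intro ns s _ _
  unfold Spec_layout_namespaces
  have eA : layout_namespaces ns s =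
      ((ns.foldl pvBodyA ([s,s,s], [])).2, (PySem.List.max? (ns.foldl pvBodyA ([s,s,s], [])).1 (fun v => v)).getD 0 + 28) := rfl
  have eB : layout_namespaces_alt ns s =
      ((ns.foldl pvBodyB ([(s,0),(s,1),(s,2)], [])).2, (PySem.List.max? ((ns.foldl pvBodyB ([(s,0),(s,1),(s,2)], [])).1.map Prod.fst) (fun v => v)).getD 0 + 28) := rfl
  rw [eA, eB, ← pv_init s]
  obtain ⟨a', b', c', hA, hB⟩ := pv_loop ns s s s []
  rw [hA, hB, pv_max]
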